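-- pv_equiv track=rewrite | github.com/dennisafa/flare-analysis | wolfapp.py | sign_change
-- ===== SOURCE A (Python) =====
-- def sign_change(model): # returns indices where the first derivative changes sign from positive to negative
--     change_sign = []
--     j = 0
--     while j < len(model)-1:
--         if model[j] > 0:
--             while model[j] > 0 and j < len(model)-1:
--                 j+=1
--             else:
--                 change_sign.append(j)
--         else:
--             j+=1
--     return change_sign
-- ===== SOURCE B (Python) =====
-- def sign_change(model):  # flat scan over adjacent pairs instead of nested while loops
--     n = len(model)
--     return [j for j in range(1, n) if model[j - 1] > 0 and (model[j] <= 0 or j == n - 1)]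
-- ===== Notes on version B (the rewrite author's own statement) =====
-- stated objective: simpler
-- what changed: Replaces the nested while/while-else with a manual pointer collapsing positive runs by a single flat comprehension over j in range(1, n) that appends j exactly when model[j-1] > 0 and (model[j] <= 0 or j is the last index).
import Mathlib
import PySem

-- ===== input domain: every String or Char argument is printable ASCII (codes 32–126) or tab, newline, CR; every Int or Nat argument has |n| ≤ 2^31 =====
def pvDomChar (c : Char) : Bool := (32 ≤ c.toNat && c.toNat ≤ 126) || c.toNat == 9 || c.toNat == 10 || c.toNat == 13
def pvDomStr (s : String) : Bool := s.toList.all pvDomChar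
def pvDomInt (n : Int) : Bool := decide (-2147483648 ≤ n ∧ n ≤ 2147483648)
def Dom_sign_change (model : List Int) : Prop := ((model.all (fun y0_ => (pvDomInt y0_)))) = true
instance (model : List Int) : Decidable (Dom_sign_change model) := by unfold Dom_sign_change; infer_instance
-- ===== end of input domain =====

-- B replaces A's nested while/while-else pointer loop with one flat comprehension over adjacent pairs (simpler).


-- ===== PORT A =====
-- inner `while model[j] > 0 and j < len(model)-1: j += 1`; indices stay in range, so getD is exact.
-- fuel = model.length only makes the loop total; pvInner_fuel_stop below proves it never runs out.
def pvInner (model : List Int) : Nat → Nat → Nat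
  | 0, j => j
  | fuel + 1, j =>
    if model.getD j 0 > 0 ∧ j < model.length - 1 then pvInner model fuel (j + 1) else j

-- outer while loop of A: state = pointer j and accumulator change_sign; same fuel remark
def pvOuter (model : List Int) : Nat → Nat → List Int → List Int
  | 0, _, acc => acc
  | fuel + 1, j, acc =>
    if j < model.length - 1 then
      if model.getD j 0 > 0 then
        pvOuter model fuel (pvInner model model.length j)
          (acc ++ [((pvInner model model.length j : Nat) : Int)])
      else
        pvOuter model fuel (j + 1) acc
    else acc

def sign_change (model : List Int) : List Int := pvOuter model model.length 0 []

-- ===== PORT B =====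
-- the comprehension's filter condition: model[j-1] > 0 and (model[j] <= 0 or j == n-1)
def pvCondB (model : List Int) (j : Int) : Bool :=
  decide (PySem.List.pyGetD model (j - 1) 0 > 0) &&
    (decide (PySem.List.pyGetD model j 0 ≤ 0) || decide (j = (model.length : Int) - 1))

def sign_change_alt (model : List Int) : List Int :=
  (PySem.List.pyRange 1 (model.length : Int)).filter (pvCondB model)

-- ===== PRECONDITION & SPEC =====
def Spec_sign_change (model : List Int) (out : List Int) : Prop := out = sign_change_alt model
instance (model : List Int) (out : List Int) : Decidable (Spec_sign_change model out) := by unfold Spec_sign_change; infer_instance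

-- ===== CLAIM (what is proved, stated in full; the proofs are below) =====
def Claim_equal_sign_change : Prop := ∀ (model : List Int), Dom_sign_change model → Spec_sign_change model (sign_change model)

-- ===== LEMMAS AND PROOFS =====

theorem pvInner_ge (model : List Int) (fuel j : Nat) : j ≤ pvInner model fuel j := by
  induction fuel generalizing j with
  | zero => exact le_refl j
  | succ fuel ih =>
    simp only [pvInner]
    split
    · have := ih (j + 1); omega
    · exact le_refl j

-- with enough fuel the inner loop really reaches its exit condition
theorem pvInner_stop (model : List Int) (fuel j : Nat) (hf : model.length - 1 - j ≤ fuel) :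
    ¬ (model.getD (pvInner model fuel j) 0 > 0 ∧ pvInner model fuel j < model.length - 1) := by
  induction fuel generalizing j with
  | zero =>
    simp only [pvInner]
    rintro ⟨-, h2⟩
    omega
  | succ fuel ih =>
    simp only [pvInner]
    split
    · rename_i hc
      exact ih (j + 1) (by omega)
    · assumption

theorem pvInner_le (model : List Int) (fuel j : Nat) (h : j ≤ model.length - 1) :
    pvInner model fuel j ≤ model.length - 1 := by
  induction fuel generalizing j with
  | zero => exact h
  | succ fuel ih =>
    simp only [pvInner]
    split
    · rename_i hc; exact ih (j + 1) (by omega)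
    · exact h

theorem pvInner_pos_below (model : List Int) (fuel j i : Nat)
    (h1 : j ≤ i) (h2 : i < pvInner model fuel j) : model.getD i 0 > 0 := by
  induction fuel generalizing j with
  | zero => simp only [pvInner] at h2; omega
  | succ fuel ih =>
    simp only [pvInner] at h2
    split at h2
    · rename_i hc
      rcases Nat.eq_or_lt_of_le h1 with rfl | hlt
      · exact hc.1
      · exact ih (j + 1) hlt h2
    · omega

theorem pvInner_gt (model : List Int) (fuel j : Nat)
    (h1 : model.getD j 0 > 0) (h2 : j < model.length - 1) (hfuel : 1 ≤ fuel) :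
    j < pvInner model fuel j := by
  cases fuel with
  | zero => omega
  | succ fuel =>
    simp only [pvInner, if_pos (And.intro h1 h2)]
    have := pvInner_ge model fuel (j + 1)
    omega

theorem filter_pyRange_nil (p : Int → Bool) (a b : Int)
    (h : ∀ x : Int, a ≤ x → x < b → p x = false) :
    (PySem.List.pyRange a b).filter p = [] := by
  rw [List.filter_eq_nil_iff]
  intro x hx
  rw [PySem.List.mem_pyRange_one] at hx
  simp [h x hx.1 hx.2]

-- pvCondB at a Nat index ≥ 1, rewritten to getD on Nats
theorem pvCondB_natCast (model : List Int) (i : Nat) (hi : 1 ≤ i) :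
    pvCondB model (i : Int) =
      (decide (model.getD (i - 1) 0 > 0) &&
        (decide (model.getD i 0 ≤ 0) || decide (i = model.length - 1))) := by
  unfold pvCondB
  have h1 : ((i : Int) - 1) = ((i - 1 : Nat) : Int) := by omega
  rw [h1, PySem.List.pyGetD_natCast, PySem.List.pyGetD_natCast]
  congr 2
  simp only [decide_eq_decide]
  omega

-- main invariant: the outer loop from pointer j produces exactly B's filtered range (j+1 .. n-1)
theorem pvOuter_eq (model : List Int) (fuel j : Nat) (acc : List Int)
    (hf : model.length - 1 - j ≤ fuel) :
    pvOuter model fuel j acc =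
      acc ++ (PySem.List.pyRange ((j : Int) + 1) (model.length : Int)).filter (pvCondB model) := by
  induction fuel generalizing j acc with
  | zero =>
    simp only [pvOuter]
    have hnil : (PySem.List.pyRange ((j : Int) + 1) (model.length : Int)).filter (pvCondB model) = [] := by
      apply filter_pyRange_nil
      intro x hx1 hx2
      omega
    rw [hnil, List.append_nil]
  | succ fuel ih =>
    simp only [pvOuter]
    split
    · rename_i h
      split
      · rename_i hp
        set k := pvInner model model.length j with hk
        have hjk : j < k := pvInner_gt model model.length j hp h (by omega)
        have hkle : k ≤ model.length - 1 := pvInner_le model model.length j (by omega)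
        have hstop := pvInner_stop model model.length j (by omega)
        rw [← hk] at hstop
        have hkn : (k : Int) < (model.length : Int) := by omega
        rw [PySem.List.pyRange_one_append ((j : Int) + 1) (k : Int) (model.length : Int)
              (by omega) (by omega),
            List.filter_append,
            PySem.List.pyRange_one_cons hkn]
        have hpre : (PySem.List.pyRange ((j : Int) + 1) (k : Int)).filter (pvCondB model) = [] := by
          apply filter_pyRange_nil
          intro x hx1 hx2
          have hxN : x = ((x.toNat : Nat) : Int) := by omega
          rw [hxN, pvCondB_natCast model x.toNat (by omega)]
          have hpos : model.getD x.toNat 0 > 0 :=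
            pvInner_pos_below model model.length j x.toNat (by omega) (by omega)
          have d2 : decide (model.getD x.toNat 0 ≤ 0) = false := decide_eq_false (by omega)
          have d3 : decide (x.toNat = model.length - 1) = false := decide_eq_false (by omega)
          rw [d2, d3]
          simp
        rw [hpre]
        have hcondk : pvCondB model (k : Int) = true := by
          rw [pvCondB_natCast model k (by omega)]
          have hposk : model.getD (k - 1) 0 > 0 :=
            pvInner_pos_below model model.length j (k - 1) (by omega) (by omega)
          have d1 : decide (model.getD (k - 1) 0 > 0) = true := decide_eq_true hposk
          by_cases hlast : k = model.length - 1
          · have d3 : decide (k = model.length - 1) = true := decide_eq_true hlast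
            rw [d1, d3]
            simp
          · have hle : model.getD k 0 ≤ 0 := by
              by_contra hg
              exact hstop ⟨by omega, by omega⟩
            have d2 : decide (model.getD k 0 ≤ 0) = true := decide_eq_true hle
            rw [d1, d2]
            simp
        rw [List.filter_cons, hcondk]
        rw [ih k (acc ++ [(k : Int)]) (by omega)]
        simp
      · rename_i hp
        have hcons : PySem.List.pyRange ((j : Int) + 1) (model.length : Int) =
            ((j : Int) + 1) :: PySem.List.pyRange ((j : Int) + 1 + 1) (model.length : Int) :=
          PySem.List.pyRange_one_cons (by omega)
        have hfalse : pvCondB model ((j : Int) + 1) = false := by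
          have hc : ((j : Int) + 1) = (((j + 1 : Nat)) : Int) := by omega
          rw [hc, pvCondB_natCast model (j + 1) (by omega)]
          have d1 : decide (model.getD (j + 1 - 1) 0 > 0) = false :=
            decide_eq_false (by rw [Nat.add_sub_cancel]; omega)
          rw [d1]
          simp
        rw [hcons, List.filter_cons, hfalse]
        have hcast : (j : Int) + 1 + 1 = ((j + 1 : Nat) : Int) + 1 := by push_cast; ring
        rw [hcast, ih (j + 1) acc (by omega)]
        simp
    · rename_i h
      have hnil : (PySem.List.pyRange ((j : Int) + 1) (model.length : Int)).filter (pvCondB model) = [] := by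
        apply filter_pyRange_nil
        intro x hx1 hx2
        omega
      rw [hnil, List.append_nil]

-- ===== VERDICT (by name: the statement is the Claim_ definition above) =====
theorem sign_change_spec : Claim_equal_sign_change := by
  intro model _
  unfold Spec_sign_change sign_change sign_change_alt
  rw [pvOuter_eq model model.length 0 [] (by omega)]
  norm_num
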